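-- pv_equiv track=rewrite | github.com/LasseKohlmeyer/ma-doc-embeddings | common_words.py | without_gerneral_words
-- ===== SOURCE A (Python) =====
-- from typing import Dict, List, Set
--
-- def without_gerneral_words(common_words: Dict[str, Set[str]]) -> Dict[str, Set[str]]:
--     medium_common_words = {}
--     for series_id_a, series_words_a in common_words.items():
--         series_words_a_copy = set()
--         series_words_a_copy.update(series_words_a)
--         general_words = set()
--         for series_id_b, series_words_b in common_words.items():
--             if series_id_a != series_id_b:
--                 general_words.update(series_words_a_copy.intersection(series_words_b))
--
--         series_words_a_copy.difference_update(general_words)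
--         medium_common_words[series_id_a] = series_words_a_copy
--     return medium_common_words
-- ===== SOURCE B (Python) =====
-- def without_gerneral_words(common_words):
--     # Inverted index: how many series contain each word (each value is a set,
--     # so every series counts each word at most once).
--     owners = {}
--     for words in common_words.values():
--         for w in words:
--             owners[w] = owners.get(w, 0) + 1
--     return {sid: {w for w in words if owners[w] == 1}
--             for sid, words in common_words.items()}
-- ===== Notes on version B (the rewrite author's own statement) =====
-- stated objective: faster
-- what changed: Replaced the nested pairwise intersection scan over all pairs of series by one pass that builds an inverted index (word -> number of series containing it) and then keeps, per series, exactly the words owned by a single series.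
import Mathlib
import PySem

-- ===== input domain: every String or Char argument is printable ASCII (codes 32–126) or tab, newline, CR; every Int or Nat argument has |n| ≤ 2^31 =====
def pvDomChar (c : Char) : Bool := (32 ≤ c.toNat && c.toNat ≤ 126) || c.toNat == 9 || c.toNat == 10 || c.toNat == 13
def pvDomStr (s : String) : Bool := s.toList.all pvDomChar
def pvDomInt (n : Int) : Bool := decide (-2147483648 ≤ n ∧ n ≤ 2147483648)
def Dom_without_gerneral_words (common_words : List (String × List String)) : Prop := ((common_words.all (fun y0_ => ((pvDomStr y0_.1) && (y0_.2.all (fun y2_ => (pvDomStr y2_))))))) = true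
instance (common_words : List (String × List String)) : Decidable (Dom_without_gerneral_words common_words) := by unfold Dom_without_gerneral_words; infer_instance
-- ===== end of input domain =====

-- B replaces A's nested pairwise-intersection scan by a single inverted-index pass
-- (word -> number of owning series) followed by a per-series filter; return-value equivalence only.

-- ===== PORT A =====
def without_gerneral_words (common_words : List (String × List String)) : List (String × List String) :=
  (common_words.foldl
    (fun (medium_common_words : PySem.Dict String (List String)) a =>
      let series_words_a_copy : PySem.Set String :=
        PySem.Set.update PySem.Set.empty a.2
      let general_words : PySem.Set String :=
        common_words.foldl
          (fun general_words b =>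
            if a.1 ≠ b.1 then
              PySem.Set.update general_words (PySem.Set.inter series_words_a_copy b.2)
            else general_words)
          PySem.Set.empty
      medium_common_words.insert a.1 (PySem.Set.diff series_words_a_copy general_words))
    PySem.Dict.empty).items

-- ===== PORT B =====
def without_gerneral_words_alt (common_words : List (String × List String)) : List (String × List String) :=
  let owners : PySem.Dict String Int :=
    common_words.foldl
      (fun owners p => p.2.foldl (fun owners w => owners.insert w (owners.getD w 0 + 1)) owners)
      PySem.Dict.empty
  common_words.map (fun p => (p.1, PySem.Set.ofList (p.2.filter (fun w => owners.getD w 0 == 1))))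

-- ===== PRECONDITION & SPEC =====
-- Pre_ excludes association lists that are not a faithful picture of A's dict-of-sets input:
-- duplicate series ids (a Python dict cannot hold them; A's per-entry iteration there is an
-- artefact of the list encoding) and duplicate words inside one value list (the value is a set).
def Pre_without_gerneral_words (common_words : List (String × List String)) : Prop :=
  (common_words.map Prod.fst).Nodup ∧ ∀ p ∈ common_words, p.2.Nodup
instance (common_words : List (String × List String)) : Decidable (Pre_without_gerneral_words common_words) := by unfold Pre_without_gerneral_words; infer_instance

def pvWitness_without_gerneral_words : (List (String × List String)) :=
  [("a", ["x", "y"]), ("b", ["y", "z"])]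

def Spec_without_gerneral_words (common_words : List (String × List String)) (out : List (String × List String)) : Prop := out = without_gerneral_words_alt common_words
instance (common_words : List (String × List String)) (out : List (String × List String)) : Decidable (Spec_without_gerneral_words common_words out) := by unfold Spec_without_gerneral_words; infer_instance

-- ===== CLAIM (what is proved, stated in full; the proofs are below) =====
def Claim_equal_without_gerneral_words : Prop := ∀ (common_words : List (String × List String)), Dom_without_gerneral_words common_words → Pre_without_gerneral_words common_words → Spec_without_gerneral_words common_words (without_gerneral_words common_words)

-- ===== LEMMAS AND PROOFS =====

-- A's per-series value, named so that the fold over the outer dict can be stated.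
def pvAVal (common_words : List (String × List String)) (a : String × List String) : List String :=
  PySem.Set.diff (PySem.Set.update PySem.Set.empty a.2)
    (common_words.foldl
      (fun general_words b =>
        if a.1 ≠ b.1 then
          PySem.Set.update general_words
            (PySem.Set.inter (PySem.Set.update PySem.Set.empty a.2) b.2)
        else general_words)
      PySem.Set.empty)

-- B's owners index counts, per word, how many entries' value lists contain it.
theorem pvOwners_getD (cw : List (String × List String)) (d : PySem.Dict String Int) (w : String) :
    (cw.foldl (fun owners p => p.2.foldl (fun owners x => owners.insert x (owners.getD x 0 + 1)) owners) d).getD w 0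
      = d.getD w 0 + ((cw.map (fun p => ((p.2.count w : Nat) : Int))).sum) := by
  induction cw generalizing d with
  | nil => simp
  | cons p rest ih =>
      simp only [List.foldl_cons, List.map_cons, List.sum_cons]
      rw [ih, PySem.Dict.getD_foldl_insert_add_one]
      ring

theorem pvSum_nonneg (l : List (String × List String)) (w : String) :
    0 ≤ ((l.map (fun p => ((p.2.count w : Nat) : Int))).sum) := by
  induction l with
  | nil => simp
  | cons p rest ih => simp only [List.map_cons, List.sum_cons]; positivity

theorem pvSum_zero_iff (l : List (String × List String)) (w : String) :
    ((l.map (fun p => ((p.2.count w : Nat) : Int))).sum) = 0 ↔ ∀ b ∈ l, w ∉ b.2 := by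
  induction l with
  | nil => simp
  | cons q rest ih =>
      simp only [List.map_cons, List.sum_cons, List.mem_cons]
      have h1 : (0:Int) ≤ ((q.2.count w : Nat) : Int) := by positivity
      have h2 := pvSum_nonneg rest w
      constructor
      · intro h
        have hc : ((q.2.count w : Nat) : Int) = 0 := by omega
        have hr : ((rest.map (fun p => ((p.2.count w : Nat) : Int))).sum) = 0 := by omega
        intro b hb
        rcases hb with h | hb
        · subst h
          intro hw
          have : 0 < b.2.count w := List.count_pos_iff.mpr hw
          omega
        · exact (ih.mp hr) b hb
      · intro h
        have hc : q.2.count w = 0 := by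
          by_contra hne
          exact (h q (Or.inl rfl)) (List.count_pos_iff.mp (Nat.pos_of_ne_zero hne))
        have hr := ih.mpr (fun b hb => h b (Or.inr hb))
        omega

-- membership in A's general_words accumulator
theorem pvMem_general (cw : List (String × List String)) (a : String × List String)
    (copy : PySem.Set String) (g : PySem.Set String) (w : String) :
    (w ∈ cw.foldl
        (fun general_words b =>
          if a.1 ≠ b.1 then PySem.Set.update general_words (PySem.Set.inter copy b.2)
          else general_words) g)
      ↔ w ∈ g ∨ ∃ b ∈ cw, a.1 ≠ b.1 ∧ w ∈ copy ∧ w ∈ b.2 := by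
  induction cw generalizing g with
  | nil => simp
  | cons b rest ih =>
      simp only [List.foldl_cons, List.mem_cons]
      by_cases hb : a.1 ≠ b.1
      · rw [if_pos hb, ih]
        simp only [PySem.Set.mem_update, PySem.Set.mem_inter]
        aesop
      · rw [if_neg hb, ih]
        aesop

-- ofList commutes with filter
theorem pvOfList_filter (p : String → Bool) (xs : List String) :
    PySem.Set.ofList (xs.filter p) = (PySem.Set.ofList xs).filter p := by
  induction xs using List.reverseRecOn with
  | nil => simp
  | append_singleton xs x ih =>
      rw [List.filter_append, PySem.Set.ofList_append_singleton]
      by_cases hp : p x = true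
      · simp only [List.filter_cons, hp, if_pos, List.filter_nil,
          PySem.Set.ofList_append_singleton, ih]
        rw [PySem.Set.add_eq_ite, PySem.Set.add_eq_ite]
        by_cases hm : x ∈ PySem.Set.ofList xs
        · rw [if_pos hm, if_pos]
          simp [List.mem_filter, hm, hp]
        · rw [if_neg hm, if_neg, List.filter_append]
          · simp [hp]
          · simp [List.mem_filter, hm]
      · simp only [List.filter_cons, hp, List.filter_nil, List.append_nil, ih,
          Bool.false_eq_true, if_false]
        rw [PySem.Set.add_eq_ite]
        by_cases hm : x ∈ PySem.Set.ofList xs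
        · rw [if_pos hm]
        · rw [if_neg hm, List.filter_append]
          simp [hp]

-- with Nodup keys, the entries left and right of a ∈ cw all carry keys ≠ a.1
theorem pvKeys_split (l1 l2 : List (String × List String)) (a : String × List String)
    (hk : ((l1 ++ a :: l2).map Prod.fst).Nodup) :
    (∀ b ∈ l1, b.1 ≠ a.1) ∧ (∀ b ∈ l2, b.1 ≠ a.1) := by
  simp only [List.map_append, List.map_cons, List.nodup_append, List.nodup_cons] at hk
  obtain ⟨_, ⟨hna, _⟩, hdisj⟩ := hk
  constructor
  · intro b hb he
    have h1 : b.1 ∈ List.map Prod.fst l1 := List.mem_map_of_mem hb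
    have h2 : b.1 ∈ a.1 :: List.map Prod.fst l2 := by simp [he]
    exact hdisj b.1 h1 b.1 h2 rfl
  · intro b hb he
    exact hna (he ▸ List.mem_map_of_mem hb)

theorem pvVal_eq (cw : List (String × List String))
    (hk : (cw.map Prod.fst).Nodup) (hv : ∀ p ∈ cw, p.2.Nodup)
    (a : String × List String) (ha : a ∈ cw) :
    pvAVal cw a
      = PySem.Set.ofList (a.2.filter (fun w =>
          (cw.foldl (fun owners p => p.2.foldl (fun owners x => owners.insert x (owners.getD x 0 + 1)) owners)
            (PySem.Dict.empty : PySem.Dict String Int)).getD w 0 == 1)) := by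
  unfold pvAVal
  rw [pvOfList_filter]
  have hcopy : PySem.Set.update PySem.Set.empty a.2 = PySem.Set.ofList a.2 := rfl
  rw [hcopy]
  have hdiff : ∀ (s t : PySem.Set String),
      PySem.Set.diff s t = s.filter (fun x => !(PySem.Set.contains t x)) := fun _ _ => rfl
  rw [hdiff]
  apply List.filter_congr
  intro w hw
  have hwa : w ∈ a.2 := (PySem.Set.mem_ofList _ _).mp hw
  -- rewrite both sides to the proposition "w is in no other series"
  have hgen : (PySem.Set.contains
      (List.foldl (fun general_words b =>
          if a.1 ≠ b.1 then PySem.Set.update general_words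
            (PySem.Set.inter (PySem.Set.ofList a.2) b.2)
          else general_words) PySem.Set.empty cw) w = true)
      ↔ ∃ b ∈ cw, a.1 ≠ b.1 ∧ w ∈ b.2 := by
    rw [PySem.Set.contains_iff _ _, pvMem_general]
    constructor
    · rintro (h | ⟨b, hb, hne, _, hwb⟩)
      · simp [PySem.Set.empty] at h
      · exact ⟨b, hb, hne, hwb⟩
    · rintro ⟨b, hb, hne, hwb⟩
      exact Or.inr ⟨b, hb, hne, hw, hwb⟩
  have hcnt : ((cw.foldl (fun owners p => p.2.foldl (fun owners x => owners.insert x (owners.getD x 0 + 1)) owners)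
        (PySem.Dict.empty : PySem.Dict String Int)).getD w 0 = 1) ↔ ∀ b ∈ cw, a.1 ≠ b.1 → w ∉ b.2 := by
    rw [pvOwners_getD]
    simp only [PySem.Dict.getD_empty, zero_add]
    obtain ⟨l1, l2, rfl⟩ := List.append_of_mem ha
    have hsplit : ((l1 ++ a :: l2).map (fun p => ((p.2.count w : Nat) : Int))).sum
        = ((l1.map (fun p => ((p.2.count w : Nat) : Int))).sum)
          + ((a.2.count w : Nat) : Int)
          + ((l2.map (fun p => ((p.2.count w : Nat) : Int))).sum) := by
      simp [List.map_append, List.sum_append]; ring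
    have hca : a.2.count w = 1 :=
      List.count_eq_one_of_mem (hv a ha) hwa
    have h1 := pvSum_nonneg l1 w
    have h2 := pvSum_nonneg l2 w
    rw [hsplit, hca]
    constructor
    · intro h b hb hne
      have h1z : ((l1.map (fun p => ((p.2.count w : Nat) : Int))).sum) = 0 := by omega
      have h2z : ((l2.map (fun p => ((p.2.count w : Nat) : Int))).sum) = 0 := by omega
      have hb' : b ∈ l1 ++ l2 := by
        rcases List.mem_append.mp hb with h' | h'
        · exact List.mem_append.mpr (Or.inl h')
        · rcases List.mem_cons.mp h' with rfl | h''
          · exact absurd rfl hne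
          · exact List.mem_append.mpr (Or.inr h'')
      rcases List.mem_append.mp hb' with h' | h'
      · exact (pvSum_zero_iff l1 w).mp h1z b h'
      · exact (pvSum_zero_iff l2 w).mp h2z b h'
    · intro h
      obtain ⟨hL1, hL2⟩ := pvKeys_split l1 l2 a hk
      have h1z : ((l1.map (fun p => ((p.2.count w : Nat) : Int))).sum) = 0 := by
        rw [pvSum_zero_iff]
        intro b hb
        exact h b (List.mem_append.mpr (Or.inl hb)) (fun he => hL1 b hb he.symm)
      have h2z : ((l2.map (fun p => ((p.2.count w : Nat) : Int))).sum) = 0 := by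
        rw [pvSum_zero_iff]
        intro b hb
        exact h b (List.mem_append.mpr (Or.inr (List.mem_cons_of_mem _ hb))) (fun he => hL2 b hb he.symm)
      omega
  -- now compare the two Bools
  by_cases hin : ∃ b ∈ cw, a.1 ≠ b.1 ∧ w ∈ b.2
  · have hL : PySem.Set.contains _ w = true := hgen.mpr hin
    rw [hL]
    have : ¬ ((cw.foldl (fun owners p => p.2.foldl (fun owners x => owners.insert x (owners.getD x 0 + 1)) owners)
        (PySem.Dict.empty : PySem.Dict String Int)).getD w 0 = 1) := by
      intro h
      obtain ⟨b, hb, hne, hwb⟩ := hin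
      exact (hcnt.mp h b hb hne) hwb
    simp [this]
  · have hL : PySem.Set.contains
        (List.foldl (fun general_words b =>
          if a.1 ≠ b.1 then PySem.Set.update general_words
            (PySem.Set.inter (PySem.Set.ofList a.2) b.2)
          else general_words) PySem.Set.empty cw) w = false := by
      rw [Bool.eq_false_iff]
      intro h
      exact hin (hgen.mp h)
    rw [hL]
    have : ((cw.foldl (fun owners p => p.2.foldl (fun owners x => owners.insert x (owners.getD x 0 + 1)) owners)
        (PySem.Dict.empty : PySem.Dict String Int)).getD w 0 = 1) := by
      rw [hcnt]
      intro b hb hne hwb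
      exact hin ⟨b, hb, hne, hwb⟩
    simp [this]

theorem pvPortA_items (cw : List (String × List String)) (hk : (cw.map Prod.fst).Nodup) :
    without_gerneral_words cw = cw.map (fun a => (a.1, pvAVal cw a)) := by
  have h := PySem.Dict.items_foldl_insert_fresh (l := cw) (k := Prod.fst)
    (v := pvAVal cw) (d := (PySem.Dict.empty : PySem.Dict String (List String)))
    (fun a _ => PySem.Dict.contains_empty _) hk
  rw [show (PySem.Dict.empty : PySem.Dict String (List String)).items = [] from rfl,
    List.nil_append] at h
  exact h

-- ===== VERDICT (by name: the statement is the Claim_ definition above) =====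
theorem without_gerneral_words_spec : Claim_equal_without_gerneral_words := by
  intro cw _ hpre
  obtain ⟨hk, hv⟩ := hpre
  show without_gerneral_words cw = without_gerneral_words_alt cw
  rw [pvPortA_items cw hk]
  unfold without_gerneral_words_alt
  apply List.map_congr_left
  intro a ha
  exact congrArg (fun l => (a.1, l)) (pvVal_eq cw hk hv a ha)
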